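-- pv_equiv track=rewrite | github.com/EHLUK/Project-PathwayV4 | app.py | parse_xer_fallback
-- ===== SOURCE A (Python) =====
-- def parse_xer_fallback(raw_text: str) -> dict:
--     """
--     Manual fallback parser that reads XER table format:
--     %T TABLE_NAME  /  %F col1 col2 ...  /  %R val1 val2 ...
--     Returns dict of {table_name: list_of_dicts}
--     """
--     tables = {}
--     current_table = None
--     current_fields = []
--
--     for line in raw_text.splitlines():
--         line = line.rstrip("\r")
--         if line.startswith("%T\t"):
--             current_table = line[3:].strip()
--             current_fields = []
--             tables[current_table] = []
--         elif line.startswith("%F\t") and current_table: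
--             current_fields = line[3:].split("\t")
--         elif line.startswith("%R\t") and current_table and current_fields:
--             values = line[3:].split("\t")
--             # Pad values if shorter than fields
--             while len(values) < len(current_fields):
--                 values.append("")
--             row = {current_fields[i]: values[i] for i in range(len(current_fields))}
--             tables[current_table].append(row)
--
--     return tables
-- ===== SOURCE B (Python) =====
-- def _rows_of(body):
--     fields = []
--     rows = []
--     for line in body:
--         if line.startswith("%F\t"):
--             fields = line[3:].split("\t")
--         elif line.startswith("%R\t") and fields:
--             values = line[3:].split("\t")
--             values += [""] * (len(fields) - len(values))
--             rows.append(dict(zip(fields, values)))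
--     return rows
--
--
-- def parse_xer_fallback(raw_text: str) -> dict:
--     lines = [l.rstrip("\r") for l in raw_text.splitlines()]
--     n = len(lines)
--     tables = {}
--     i = 0
--     # ignore everything before the first %T marker
--     while i < n and not lines[i].startswith("%T\t"):
--         i += 1
--     # one pass per table section
--     while i < n:
--         name = lines[i][3:].strip()
--         i += 1
--         body = []
--         while i < n and not lines[i].startswith("%T\t"):
--             body.append(lines[i])
--             i += 1
--         tables[name] = _rows_of(body) if name else []
--     return tables
-- ===== Notes on version B (the rewrite author's own statement) =====
-- stated objective: alternative
-- what changed: A is a single-pass three-variable state machine over all lines; B first cuts the line list into per-%T sections and then parses each section's rows independently with a small fields/rows fold, assigning tables[name] per section.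
import Mathlib
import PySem

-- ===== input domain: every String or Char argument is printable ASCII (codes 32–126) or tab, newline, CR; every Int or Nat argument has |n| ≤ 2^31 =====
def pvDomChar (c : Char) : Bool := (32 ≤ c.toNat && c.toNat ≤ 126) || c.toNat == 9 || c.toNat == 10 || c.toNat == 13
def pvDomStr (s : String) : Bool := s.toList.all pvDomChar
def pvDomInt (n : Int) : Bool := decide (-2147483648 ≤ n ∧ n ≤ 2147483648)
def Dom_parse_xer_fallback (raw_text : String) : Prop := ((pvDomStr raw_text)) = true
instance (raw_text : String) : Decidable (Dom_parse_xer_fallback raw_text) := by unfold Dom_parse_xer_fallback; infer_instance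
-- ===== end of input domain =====

-- B re-decomposes A's three-way line state machine into section splitting + independent
-- per-section row parsing (objective: alternative decomposition, same return value).

-- shared tiny primitives (both Pythons literally perform these operations)
-- s.rstrip("\r"): drop trailing '\r' characters (exact; ported by hand, PySem has no rstrip-with-chars)
def pvRstripCR (s : String) : String := String.ofList ((s.toList.reverse.dropWhile (· == '\r')).reverse)
def pvIsT (l : String) : Bool := PySem.Str.startswith l "%T\t"
def pvIsF (l : String) : Bool := PySem.Str.startswith l "%F\t"
def pvIsR (l : String) : Bool := PySem.Str.startswith l "%R\t"
-- line[3:]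
def pvTail3 (l : String) : String := PySem.Str.slice l (some 3) none
-- line[3:].split("\t")  (sep "\t" ≠ "", so split? is always `some`)
def pvSplitTab (l : String) : List String := (PySem.Str.split? (pvTail3 l) "\t").getD []

-- ===== PORT A =====
-- Python truthiness of current_table (None or "" are falsy)
def pvTruthy : Option String → Bool
  | none => false
  | some s => !(s == "")

-- one iteration of A's for-loop over (tables, current_table, current_fields)
def pvAStep (st : PySem.Dict String (List (List (String × String))) × Option String × List String)
    (line0 : String) : PySem.Dict String (List (List (String × String))) × Option String × List String :=
  let line := pvRstripCR line0
  let tables := st.1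
  let ct := st.2.1
  let cf := st.2.2
  if pvIsT line then
    let name := PySem.Str.strip (pvTail3 line)
    (tables.insert name [], some name, [])
  else if pvIsF line && pvTruthy ct then
    (tables, ct, pvSplitTab line)
  else if pvIsR line && pvTruthy ct && !cf.isEmpty then
    let values := pvSplitTab line
    -- the while-pad loop: append "" until len(values) = len(fields) (its exact effect)
    let padded := values ++ List.replicate (cf.length - values.length) ""
    -- {fields[i]: values[i] for i in range(len(fields))}; indices are in range, getD is exact
    let row := ((List.range cf.length).foldl
        (fun d i => d.insert (cf.getD i "") (padded.getD i ""))
        (PySem.Dict.empty : PySem.Dict String String)).items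
    -- tables[current_table].append(row); the key is always present (inserted at its %T line)
    (tables.modify (ct.getD "") [] (fun rs => rs ++ [row]), ct, cf)
  else (tables, ct, cf)

def parse_xer_fallback (raw_text : String) : List (String × List (List (String × String))) :=
  (((PySem.Str.splitlines raw_text).foldl pvAStep
      ((PySem.Dict.empty : PySem.Dict String (List (List (String × String)))), none, ([] : List String))).1).items

-- ===== PORT B =====
-- one iteration of _rows_of's for-loop over (fields, rows)
def pvBRowStep (st : List String × List (List (String × String))) (line : String) :
    List String × List (List (String × String)) :=
  if pvIsF line then (pvSplitTab line, st.2)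
  else if pvIsR line && !st.1.isEmpty then
    let values := pvSplitTab line
    let padded := values ++ List.replicate (st.1.length - values.length) ""
    -- dict(zip(fields, values))
    (st.1, st.2 ++ [(PySem.Dict.ofList (st.1.zip padded)).items])
  else st

def pvRowsOf (body : List String) : List (List (String × String)) :=
  (body.foldl pvBRowStep (([] : List String), [])).2

-- the middle while loop: cut the remaining lines (starting at a %T marker) into sections
def pvSections : List String → List (String × List String)
  | [] => []
  | l :: ls =>
    (PySem.Str.strip (pvTail3 l), ls.takeWhile (fun x => !pvIsT x)) ::
      pvSections (ls.dropWhile (fun x => !pvIsT x))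
termination_by l => l.length
decreasing_by
  simp only [List.length_cons]
  exact Nat.lt_succ_of_le (List.length_dropWhile_le _ _)

def parse_xer_fallback_alt (raw_text : String) : List (String × List (List (String × String))) :=
  let lines := (PySem.Str.splitlines raw_text).map pvRstripCR
  ((pvSections (lines.dropWhile (fun l => !pvIsT l))).foldl
      (fun T nb => T.insert nb.1 (if nb.1 == "" then [] else pvRowsOf nb.2))
      (PySem.Dict.empty : PySem.Dict String (List (List (String × String))))).items

-- ===== PRECONDITION & SPEC =====
def Spec_parse_xer_fallback (raw_text : String) (out : List (String × List (List (String × String)))) : Prop := out = parse_xer_fallback_alt raw_text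
instance (raw_text : String) (out : List (String × List (List (String × String)))) : Decidable (Spec_parse_xer_fallback raw_text out) := by unfold Spec_parse_xer_fallback; infer_instance

-- ===== CLAIM (what is proved, stated in full; the proofs are below) =====
def Claim_equal_parse_xer_fallback : Prop := ∀ (raw_text : String), Dom_parse_xer_fallback raw_text → Spec_parse_xer_fallback raw_text (parse_xer_fallback raw_text)

-- ===== LEMMAS AND PROOFS =====

lemma pvRstripCR_idem (s : String) : pvRstripCR (pvRstripCR s) = pvRstripCR s := by
  simp [pvRstripCR, List.dropWhile_idempotent]

lemma pvAStep_rstrip (st : PySem.Dict String (List (List (String × String))) × Option String × List String)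
    (l : String) : pvAStep st (pvRstripCR l) = pvAStep st l := by
  unfold pvAStep
  rw [pvRstripCR_idem]

-- a section body (no %T lines) leaves the state unchanged when current_table is falsy
lemma pvSkip (body : List String) (h : ∀ l ∈ body, pvIsT l = false ∧ pvRstripCR l = l) :
    ∀ (T : PySem.Dict String (List (List (String × String)))) (ct : Option String)
      (cf : List String), pvTruthy ct = false →
      body.foldl pvAStep (T, ct, cf) = (T, ct, cf) := by
  induction body with
  | nil => intro T ct cf _; rfl
  | cons l body ih =>
    intro T ct cf hct
    obtain ⟨hT, hR⟩ := h l (by simp)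
    have hstep : pvAStep (T, ct, cf) l = (T, ct, cf) := by
      unfold pvAStep
      simp [hR, hT, hct]
    rw [List.foldl_cons, hstep]
    exact ih (fun l hl => h l (by simp [hl])) T ct cf hct

-- accumulator lemma for B's row fold
lemma pvBRow_acc (body : List String) : ∀ (f : List String) (r : List (List (String × String))),
    body.foldl pvBRowStep (f, r) =
      ((body.foldl pvBRowStep (f, [])).1, r ++ (body.foldl pvBRowStep (f, [])).2) := by
  induction body with
  | nil => intro f r; simp
  | cons l body ih =>
    intro f r
    rw [List.foldl_cons, List.foldl_cons]
    by_cases hF : pvIsF l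
    · have h1 : ∀ r', pvBRowStep (f, r') l = (pvSplitTab l, r') := by
        intro r'; unfold pvBRowStep; simp [hF]
      rw [h1, h1]
      exact ih _ _
    · by_cases hR : (pvIsR l && !f.isEmpty) = true
      · have h1 : ∀ r', pvBRowStep (f, r') l =
            (f, r' ++ [(PySem.Dict.ofList (f.zip (pvSplitTab l ++
              List.replicate (f.length - (pvSplitTab l).length) ""))).items]) := by
          intro r'; unfold pvBRowStep; simp [hF, hR]
        rw [h1, h1, ih f (r ++ _), ih f ([] ++ _)]
        simp
      · have h1 : ∀ r', pvBRowStep (f, r') l = (f, r') := by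
          intro r'; unfold pvBRowStep; simp [hF, hR]
        rw [h1, h1]
        exact ih _ _

-- A's row dict (index comprehension) = B's row dict (dict(zip(...))), generalized over the start dict
lemma pvRow_eq_aux (f : List String) : ∀ (padded : List String) (d : PySem.Dict String String),
    f.length ≤ padded.length →
    (List.range f.length).foldl (fun d i => d.insert (f.getD i "") (padded.getD i "")) d =
      d.update (f.zip padded) := by
  induction f with
  | nil => intro padded d _; simp [PySem.Dict.update]
  | cons x f ih =>
    intro padded d hlen
    cases padded with
    | nil => simp at hlen
    | cons y padded =>
      rw [List.length_cons, List.range_succ_eq_map, List.foldl_cons, List.foldl_map]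
      simp only [List.getD_cons_zero, List.getD_cons_succ, List.zip_cons_cons,
        PySem.Dict.update, List.foldl_cons]
      have := ih padded (d.insert x y) (by simpa using hlen)
      simpa [PySem.Dict.update] using this

lemma pvRow_eq (f padded : List String) (h : f.length ≤ padded.length) :
    (List.range f.length).foldl (fun d i => d.insert (f.getD i "") (padded.getD i ""))
        (PySem.Dict.empty : PySem.Dict String String) =
      PySem.Dict.ofList (f.zip padded) := by
  rw [PySem.Dict.ofList]
  exact pvRow_eq_aux f padded _ h

-- appending rows one by one into tables[n] after tables[n] = acc
lemma pvInsFold (rows : List (List (String × String))) :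
    ∀ (T : PySem.Dict String (List (List (String × String)))) (n : String)
      (acc : List (List (String × String))),
    rows.foldl (fun T' row => T'.modify n [] (fun rs => rs ++ [row])) (T.insert n acc) =
      T.insert n (acc ++ rows) := by
  induction rows with
  | nil => intro T n acc; simp
  | cons r rows ih =>
    intro T n acc
    rw [List.foldl_cons]
    have h1 : (T.insert n acc).modify n [] (fun rs => rs ++ [r]) = T.insert n (acc ++ [r]) := by
      rw [PySem.Dict.modify, PySem.Dict.getD_insert_self, PySem.Dict.insert_insert_self]
    rw [h1, ih]
    simp

-- inside a section with a truthy table name, A's fold = B's row fold, rows landing in tables[n]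
lemma pvBody (body : List String) (hm : ∀ l ∈ body, pvIsT l = false ∧ pvRstripCR l = l) :
    ∀ (T : PySem.Dict String (List (List (String × String)))) (n : String) (f : List String),
      n ≠ "" →
      body.foldl pvAStep (T, some n, f) =
        ((body.foldl pvBRowStep (f, [])).2.foldl
            (fun T' row => T'.modify n [] (fun rs => rs ++ [row])) T,
          some n, (body.foldl pvBRowStep (f, [])).1) := by
  induction body with
  | nil => intro T n f _; rfl
  | cons l body ih =>
    intro T n f hn
    obtain ⟨hT, hRs⟩ := hm l (by simp)
    have hmem := fun l hl => hm l (List.mem_cons_of_mem _ hl)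
    have htru : pvTruthy (some n) = true := by simp [pvTruthy, hn]
    rw [List.foldl_cons, List.foldl_cons]
    by_cases hF : pvIsF l
    · have hstepA : pvAStep (T, some n, f) l = (T, some n, pvSplitTab l) := by
        unfold pvAStep; simp [hRs, hT, hF, htru]
      have hstepB : pvBRowStep (f, []) l = (pvSplitTab l, []) := by
        unfold pvBRowStep; simp [hF]
      rw [hstepA, hstepB]
      exact ih hmem T n _ hn
    · by_cases hRl : (pvIsR l && !f.isEmpty) = true
      · have hlen : f.length ≤ (pvSplitTab l ++
            List.replicate (f.length - (pvSplitTab l).length) "").length := by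
          simp; omega
        set row := (PySem.Dict.ofList (f.zip (pvSplitTab l ++
            List.replicate (f.length - (pvSplitTab l).length) ""))).items with hrowdef
        have hstepA : pvAStep (T, some n, f) l =
            (T.modify n [] (fun rs => rs ++ [row]), some n, f) := by
          unfold pvAStep
          rw [hRs]
          simp only [hT, hF, htru, hRl, Bool.false_eq_true, Bool.and_true, if_false,
            Option.getD_some, if_pos]
          rw [pvRow_eq f _ hlen]
        have hstepB : pvBRowStep (f, []) l = (f, [row]) := by
          unfold pvBRowStep
          simp [hF, hRl]
          rw [hrowdef]
        rw [hstepA, hstepB, ih hmem _ n f hn, pvBRow_acc body f [row]]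
        simp
      · have hstepA : pvAStep (T, some n, f) l = (T, some n, f) := by
          unfold pvAStep
          rcases Bool.and_eq_false_iff.mp (Bool.not_eq_true _ ▸ hRl) with h | h
          · simp [hRs, hT, hF, h]
          · simp [hRs, hT, hF, h, htru]
        have hstepB : pvBRowStep (f, []) l = (f, []) := by
          unfold pvBRowStep
          simp [hF, hRl]
        rw [hstepA, hstepB]
        exact ih hmem T n f hn

-- "remaining lines start with a %T marker (or are exhausted)"
def pvHeadT : List String → Prop
  | [] => True
  | l :: _ => pvIsT l = true

lemma pvHeadT_dropWhile (ls : List String) : pvHeadT (ls.dropWhile (fun x => !pvIsT x)) := by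
  induction ls with
  | nil => trivial
  | cons l ls ih =>
    by_cases h : pvIsT l
    · simp [h, pvHeadT]
    · simpa [List.dropWhile_cons, h] using ih

-- the main simulation: from any state, a %T-headed tail drives A to B's section fold
lemma pvMain (rest : List String) (hm : ∀ l ∈ rest, pvRstripCR l = l) (hh : pvHeadT rest) :
    ∀ (T : PySem.Dict String (List (List (String × String)))) (ct : Option String)
      (cf : List String),
      (rest.foldl pvAStep (T, ct, cf)).1 =
        (pvSections rest).foldl
          (fun T nb => T.insert nb.1 (if nb.1 == "" then [] else pvRowsOf nb.2)) T := by
  induction rest using pvSections.induct with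
  | case1 => intro T ct cf; simp [pvSections]
  | case2 l ls ih =>
    intro T ct cf
    have hTl : pvIsT l = true := hh
    have hRl : pvRstripCR l = l := hm l (by simp)
    have hstep : pvAStep (T, ct, cf) l =
        (T.insert (PySem.Str.strip (pvTail3 l)) [], some (PySem.Str.strip (pvTail3 l)), []) := by
      unfold pvAStep; simp [hRl, hTl]
    have hsplit : ls = ls.takeWhile (fun x => !pvIsT x) ++ ls.dropWhile (fun x => !pvIsT x) :=
      (List.takeWhile_append_dropWhile).symm
    have hmls : ∀ x ∈ ls, pvRstripCR x = x := fun x hx => hm x (List.mem_cons_of_mem _ hx)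
    have hmtw : ∀ x ∈ ls.takeWhile (fun x => !pvIsT x), pvIsT x = false ∧ pvRstripCR x = x := by
      intro x hx
      refine ⟨by simpa using List.mem_takeWhile_imp hx,
        hmls x (List.IsPrefix.mem hx (List.takeWhile_prefix _))⟩
    have hmdw : ∀ x ∈ ls.dropWhile (fun x => !pvIsT x), pvRstripCR x = x := fun x hx =>
      hmls x (List.IsSuffix.mem hx (List.dropWhile_suffix _))
    have hhdw := pvHeadT_dropWhile ls
    rw [List.foldl_cons, hstep]
    conv_lhs => rw [hsplit, List.foldl_append]
    rw [pvSections, List.foldl_cons]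
    set name := PySem.Str.strip (pvTail3 l) with hname
    by_cases hnil : name = ""
    · rw [pvSkip _ hmtw _ _ _ (by simp [hnil, pvTruthy])]
      rw [ih hmdw hhdw]
      simp [hnil]
    · rw [pvBody _ hmtw _ name _ hnil, pvInsFold, ih hmdw hhdw]
      simp [hnil, pvRowsOf]

theorem pv_equal (raw_text : String) :
    parse_xer_fallback raw_text = parse_xer_fallback_alt raw_text := by
  unfold parse_xer_fallback parse_xer_fallback_alt
  set L := PySem.Str.splitlines raw_text with hL
  have h1 : L.foldl pvAStep
      ((PySem.Dict.empty : PySem.Dict String (List (List (String × String)))), none,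
        ([] : List String)) =
      (L.map pvRstripCR).foldl pvAStep (PySem.Dict.empty, none, []) := by
    rw [List.foldl_map]
    simp only [pvAStep_rstrip]
  rw [h1]
  set lines := L.map pvRstripCR with hlines
  have hfix : ∀ l ∈ lines, pvRstripCR l = l := by
    intro l hl
    obtain ⟨x, _, rfl⟩ := List.mem_map.mp hl
    exact pvRstripCR_idem x
  have hsplit : lines = lines.takeWhile (fun x => !pvIsT x) ++
      lines.dropWhile (fun x => !pvIsT x) := (List.takeWhile_append_dropWhile).symm
  conv_lhs => rw [hsplit, List.foldl_append]
  rw [pvSkip _ (fun x hx => ⟨by simpa using List.mem_takeWhile_imp hx,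
      hfix x (List.IsPrefix.mem hx (List.takeWhile_prefix _))⟩) _ _ _ rfl]
  rw [pvMain _ (fun x hx => hfix x (List.IsSuffix.mem hx (List.dropWhile_suffix _)))
      (pvHeadT_dropWhile lines)]

-- ===== VERDICT (by name: the statement is the Claim_ definition above) =====
theorem parse_xer_fallback_spec : Claim_equal_parse_xer_fallback := by
  intro raw_text _
  unfold Spec_parse_xer_fallback
  exact pv_equal raw_text
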